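-- pv_equiv track=rewrite | github.com/wo-von/AdventOFCode2020 | 17/conway.py | add_rims
-- ===== SOURCE A (Python) =====
-- import copy
--
-- def add_rims(lst):
--     '''
--     gets a plate, and checks if there should be rims around it
--     '''
--     left = right = top = bottom = False
--     for row in lst:
--         if row[0] == '#': # This part is not efficient enough
--             left |= True
--         if row[-1] == '#':
--             right |= True
--         if left == True and right == True:
--             break
--
--     expanded = [ ['.'] * left + row[:] + ["."] * right for row in lst]
--     empty_row = ["." for _ in range(len(expanded[0]))]
--
--     if "#" in expanded[0]:
--         expanded.insert(0, copy.deepcopy(empty_row))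
--     if "#" in expanded[-1]:
--         expanded.append(copy.deepcopy(empty_row))
--     return expanded
-- ===== SOURCE B (Python) =====
-- def add_rims(lst):
--     top = '#' in lst[0]
--     bottom = '#' in lst[-1]
--     left = '#' in [row[0] for row in lst]
--     right = '#' in [row[-1] for row in lst]
--
--     def cell(r, c):
--         rr, cc = r - top, c - left
--         if 0 <= rr < len(lst) and 0 <= cc < len(lst[rr]):
--             return lst[rr][cc]
--         return '.'
--
--     def width(r):
--         rr = r - top
--         base = len(lst[rr]) if 0 <= rr < len(lst) else len(lst[0])
--         return base + left + right
--
--     return [[cell(r, c) for c in range(width(r))]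
--             for r in range(len(lst) + top + bottom)]
-- ===== Notes on version B (the rewrite author's own statement) =====
-- stated objective: alternative
-- what changed: B builds the output positionally: it iterates over the output coordinates (r,c) and fills each cell by an index-shift lookup cell(r,c)=lst[r-top][c-left] (or '.') — no row padding/concatenation and no insert/append phase as in A.
import Mathlib
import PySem

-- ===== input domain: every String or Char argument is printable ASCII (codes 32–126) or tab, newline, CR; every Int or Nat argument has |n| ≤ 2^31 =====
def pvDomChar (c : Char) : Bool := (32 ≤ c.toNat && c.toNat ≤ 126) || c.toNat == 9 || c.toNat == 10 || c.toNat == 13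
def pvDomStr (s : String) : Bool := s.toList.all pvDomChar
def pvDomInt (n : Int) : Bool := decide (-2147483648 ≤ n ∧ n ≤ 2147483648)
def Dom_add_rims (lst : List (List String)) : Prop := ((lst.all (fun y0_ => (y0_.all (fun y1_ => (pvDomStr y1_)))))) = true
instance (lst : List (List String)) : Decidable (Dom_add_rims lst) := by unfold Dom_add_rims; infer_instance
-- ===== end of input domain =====

-- B builds the output positionally: it iterates over output coordinates (r, c) and fills each
-- cell by an index-shift lookup lst[r-top][c-left] (or '.'), instead of A's break-loop flag
-- accumulation, per-row padding/concatenation and insert/append phase (objective: alternative).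

-- ===== PORT A =====
-- the flag loop: 'for row in lst: if row[0]=='#': left |= True; if row[-1]=='#': right |= True; if left and right: break'
def addRimsFlagLoop : List (List String) → Bool → Bool → Bool × Bool
  | [], l, r => (l, r)
  | row :: rest, l, r =>
      let l' := if PySem.List.pyGet? row 0 == some "#" then true else l
      let r' := if PySem.List.pyGet? row (-1) == some "#" then true else r
      if l' && r' then (l', r') else addRimsFlagLoop rest l' r'

def add_rims (lst : List (List String)) : List (List String) :=
  let fr := addRimsFlagLoop lst false false
  let left := fr.1
  let right := fr.2
  let expanded := lst.map (fun row => (if left then ["."] else []) ++ row ++ (if right then ["."] else []))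
  -- expanded[0] raises IndexError on empty lst (excluded by Pre_); '.getD []' totalises the port there
  let empty_row := (List.range ((PySem.List.pyGet? expanded 0).getD []).length).map (fun _ => ".")
  let expanded2 := if ((PySem.List.pyGet? expanded 0).getD []).contains "#" then empty_row :: expanded else expanded
  let expanded3 := if ((PySem.List.pyGet? expanded2 (-1)).getD []).contains "#" then expanded2 ++ [empty_row] else expanded2
  expanded3

-- ===== PORT B =====
-- cell(r, c): 'return lst[r-top][c-left] if in range else "."' (Python int arithmetic: Int here)
def addRimsAltCell (lst : List (List String)) (top left : Bool) (r c : Nat) : String :=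
  let rr : Int := (r : Int) - (if top then 1 else 0)
  let cc : Int := (c : Int) - (if left then 1 else 0)
  if 0 ≤ rr ∧ rr < lst.length ∧ 0 ≤ cc ∧ cc < ((PySem.List.pyGet? lst rr).getD []).length then
    (PySem.List.pyGet? ((PySem.List.pyGet? lst rr).getD []) cc).getD "."
  else "."

-- width(r): 'len(lst[r-top]) if 0 <= r-top < len(lst) else len(lst[0]); + left + right'
def addRimsAltWidth (lst : List (List String)) (top left right : Bool) (r : Nat) : Nat :=
  let rr : Int := (r : Int) - (if top then 1 else 0)
  (if 0 ≤ rr ∧ rr < lst.length then ((PySem.List.pyGet? lst rr).getD []).length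
   else ((PySem.List.pyGet? lst 0).getD []).length)
  + (if left then 1 else 0) + (if right then 1 else 0)

def add_rims_alt (lst : List (List String)) : List (List String) :=
  -- lst[0] / row[0] raise IndexError on empty lst / an empty row (excluded by Pre_); '.getD' totalises
  let top := ((PySem.List.pyGet? lst 0).getD []).contains "#"
  let bottom := ((PySem.List.pyGet? lst (-1)).getD []).contains "#"
  let left := (lst.map (fun row => (PySem.List.pyGet? row 0).getD "")).contains "#"
  let right := (lst.map (fun row => (PySem.List.pyGet? row (-1)).getD "")).contains "#"
  (List.range (lst.length + (if top then 1 else 0) + (if bottom then 1 else 0))).map (fun r =>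
    (List.range (addRimsAltWidth lst top left right r)).map (fun c =>
      addRimsAltCell lst top left r c))

-- ===== PRECONDITION & SPEC =====
-- Pre_ excludes the empty grid and grids containing an empty row: Python A raises IndexError
-- there (row[0] / expanded[0]) except on the few such grids where the flag loop breaks before
-- reaching the empty row — and on those B raises IndexError itself (row[0] in its flag pass).
def Pre_add_rims (lst : List (List String)) : Prop := lst ≠ [] ∧ ∀ row ∈ lst, row ≠ []
instance (lst : List (List String)) : Decidable (Pre_add_rims lst) := by unfold Pre_add_rims; infer_instance
def pvWitness_add_rims : List (List String) := [["#", "."], [".", "."]]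

def Spec_add_rims (lst : List (List String)) (out : List (List String)) : Prop := out = add_rims_alt lst
instance (lst : List (List String)) (out : List (List String)) : Decidable (Spec_add_rims lst out) := by unfold Spec_add_rims; infer_instance

-- ===== CLAIM (what is proved, stated in full; the proofs are below) =====
def Claim_equal_add_rims : Prop := ∀ (lst : List (List String)), Dom_add_rims lst → Pre_add_rims lst → Spec_add_rims lst (add_rims lst)

-- ===== LEMMAS AND PROOFS =====

-- canonical form both ports are reduced to: optional top rim ++ padded rows ++ optional bottom rim
def addRimsCanon (lst : List (List String)) : List (List String) :=
  let top := ((PySem.List.pyGet? lst 0).getD []).contains "#"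
  let bottom := ((PySem.List.pyGet? lst (-1)).getD []).contains "#"
  let left := lst.any (fun row => PySem.List.pyGet? row 0 == some "#")
  let right := lst.any (fun row => PySem.List.pyGet? row (-1) == some "#")
  let body := lst.map (fun row => (if left then ["."] else []) ++ row ++ (if right then ["."] else []))
  let empty := List.replicate (((PySem.List.pyGet? lst 0).getD []).length
                 + (if left then 1 else 0) + (if right then 1 else 0)) "."
  (if top then [empty] else []) ++ body ++ (if bottom then [empty] else [])

-- A's break-loop computes exactly the two 'any' flags.
theorem addRimsFlagLoop_eq (lst : List (List String)) (l r : Bool) :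
    addRimsFlagLoop lst l r =
      (l || lst.any (fun row => PySem.List.pyGet? row 0 == some "#"),
       r || lst.any (fun row => PySem.List.pyGet? row (-1) == some "#")) := by
  induction lst generalizing l r with
  | nil => simp [addRimsFlagLoop]
  | cons row rest ih =>
    have e1 : ∀ (c b : Bool), (if c = true then true else b) = (b || c) := by decide
    simp only [addRimsFlagLoop, List.any_cons, e1, ih]
    cases hc1 : (PySem.List.pyGet? row 0 == some "#") <;>
      cases hc2 : (PySem.List.pyGet? row (-1) == some "#") <;>
      cases l <;> cases r <;> simp

theorem contains_pad (pad pad' : List String) (row : List String)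
    (h : "#" ∉ pad) (h' : "#" ∉ pad') :
    (pad ++ row ++ pad').contains "#" = row.contains "#" := by
  simp [h, h']

-- A equals the canonical form (on all inputs).
theorem add_rims_eq_canon (lst : List (List String)) :
    add_rims lst = addRimsCanon lst := by
  cases lst with
  | nil => decide
  | cons h t =>
    simp only [add_rims, addRimsCanon, addRimsFlagLoop_eq, Bool.false_or]
    set left := (h :: t).any (fun row => PySem.List.pyGet? row 0 == some "#") with hleft
    set right := (h :: t).any (fun row => PySem.List.pyGet? row (-1) == some "#") with hright
    set padL : List String := if left then ["."] else [] with hpadL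
    set padR : List String := if right then ["."] else [] with hpadR
    have hpl : "#" ∉ padL := by rw [hpadL]; split <;> simp
    have hpr : "#" ∉ padR := by rw [hpadR]; split <;> simp
    set f : List String → List String := fun row => padL ++ row ++ padR with hf
    obtain ⟨L, hL⟩ : ∃ L, (h :: t).getLast? = some L :=
      Option.isSome_iff_exists.mp (by simp)
    have hmap : (h :: t).map f = f h :: t.map f := by simp
    have hA0 : PySem.List.pyGet? ((h :: t).map f) 0 = some (f h) := by
      rw [hmap]; exact PySem.List.pyGet?_zero_cons _ _
    have hB0 : PySem.List.pyGet? (h :: t) 0 = some h := PySem.List.pyGet?_zero_cons _ _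
    have hAlast : PySem.List.pyGet? ((h :: t).map f) (-1) = some (f L) := by
      rw [PySem.List.pyGet?_neg_one, List.getLast?_map, hL]; rfl
    have hBlast : PySem.List.pyGet? (h :: t) (-1) = some L := by
      rw [PySem.List.pyGet?_neg_one, hL]
    have hctop : (f h).contains "#" = h.contains "#" := contains_pad _ _ _ hpl hpr
    have hcbot : (f L).contains "#" = L.contains "#" := contains_pad _ _ _ hpl hpr
    have hempty : (List.range (f h).length).map (fun _ => ".") =
        List.replicate (h.length + (if left then 1 else 0) + (if right then 1 else 0)) "." := by
      rw [hf]
      simp only [List.map_const', List.length_range, List.length_append]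
      congr 1
      have : padL.length = (if left then 1 else 0) := by rw [hpadL]; split <;> rfl
      have : padR.length = (if right then 1 else 0) := by rw [hpadR]; split <;> rfl
      omega
    rw [hA0, hB0, hBlast]
    simp only [Option.getD_some, hctop, hempty]
    by_cases htop : h.contains "#" = true
    · simp only [htop, if_true]
      have : PySem.List.pyGet?
          ((List.replicate (h.length + (if left then 1 else 0) + (if right then 1 else 0)) ".") ::
            (h :: t).map f) (-1) = some (f L) := by
        rw [PySem.List.pyGet?_neg_one, hmap, List.getLast?_cons_cons, ← hmap,
          List.getLast?_map, hL]; rfl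
      rw [this]
      simp only [Option.getD_some, hcbot]
      by_cases hbot : "#" ∈ L <;> simp [hbot]
    · simp only [htop, Bool.false_eq_true, if_false]
      rw [hAlast]
      simp only [Option.getD_some, hcbot]
      by_cases hbot : "#" ∈ L <;> simp [hbot]

-- under Pre_, B's mapped flag pass equals the canonical 'any' flags
theorem alt_flag_eq (lst : List (List String)) (i : Int)
    (hne : ∀ row ∈ lst, row ≠ []) (hi : i = 0 ∨ i = -1) :
    (lst.map (fun row => (PySem.List.pyGet? row i).getD "")).contains "#"
      = lst.any (fun row => PySem.List.pyGet? row i == some "#") := by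
  induction lst with
  | nil => simp
  | cons h t ih =>
    have hh : h ≠ [] := hne h (by simp)
    obtain ⟨x, hx⟩ : ∃ x, PySem.List.pyGet? h i = some x := by
      rcases hi with rfl | rfl
      · cases h with
        | nil => exact absurd rfl hh
        | cons a t' => exact ⟨a, PySem.List.pyGet?_zero_cons _ _⟩
      · rw [PySem.List.pyGet?_neg_one]
        exact Option.isSome_iff_exists.mp (by simp [List.getLast?_isSome, hh])
    have hcomm : (("#" : String) == x) = (x == "#") := by
      cases hab : (("#" : String) == x) <;> cases hba : (x == ("#" : String)) <;>
        first
        | rfl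
        | (exfalso; simp only [beq_iff_eq, beq_eq_false_iff_ne] at hab hba; simp_all [eq_comm])
    simp only [List.map_cons, List.contains_cons, List.any_cons, hx, Option.getD_some,
      ih (fun r hr => hne r (by simp [hr])), hcomm]
    congr 1

-- core: a row generated cell-by-cell by in-range lookup is the row itself
theorem row_core_eq (row : List String) (g : Nat → String)
    (hg : ∀ c, c < row.length → g c = (PySem.List.pyGet? row (c : Int)).getD ".") :
    (List.range row.length).map g = row := by
  apply List.ext_getElem
  · simp
  · intro c hc1 hc2
    simp only [List.getElem_map, List.getElem_range]
    rw [hg c hc2, PySem.List.pyGet?_natCast, List.getElem?_eq_getElem hc2, Option.getD_some]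

-- the row plus its optional right pad
theorem row_tail_eq (row : List String) (r : Bool) (g : Nat → String)
    (hg : ∀ c, g c = (if (c : Int) < (row.length : Int)
                      then (PySem.List.pyGet? row (c : Int)).getD "." else ".")) :
    (List.range (row.length + (if r then 1 else 0))).map g
      = row ++ (if r then ["."] else []) := by
  have hcore : (List.range row.length).map g = row :=
    row_core_eq row g (fun c hc => by rw [hg c, if_pos (by exact_mod_cast hc)])
  cases r
  · simpa using hcore
  · rw [show row.length + (if true = true then 1 else 0) = row.length + 1 from rfl,
      List.range_succ, List.map_append, hcore]
    simp only [List.map_cons, List.map_nil, hg row.length]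
    rw [if_neg (by omega)]
    norm_num

-- generic: a row generated cell-by-cell from the shifted lookup equals the padded row
theorem range_map_pad (row : List String) (l r : Bool) (g : Nat → String)
    (hg : ∀ c, g c =
      (if 0 ≤ (c : Int) - (if l then 1 else 0) ∧ (c : Int) - (if l then 1 else 0) < row.length
       then (PySem.List.pyGet? row ((c : Int) - (if l then 1 else 0))).getD "." else ".")) :
    (List.range ((if l then 1 else 0) + row.length + (if r then 1 else 0))).map g
      = (if l then ["."] else []) ++ row ++ (if r then ["."] else []) := by
  cases l
  · have hg' : ∀ c, g c = (if (c : Int) < (row.length : Int)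
        then (PySem.List.pyGet? row (c : Int)).getD "." else ".") := by
      intro c
      rw [hg c]
      simp only [show (if false = true then (1 : Int) else 0) = 0 from rfl, sub_zero]
      rw [if_congr (Iff.intro (fun h => h.2) (fun h => ⟨Int.natCast_nonneg c, h⟩)) rfl rfl]
    simpa using row_tail_eq row r g hg'
  · rw [show (if true = true then (1 : Nat) else 0) = 1 from rfl,
      show 1 + row.length + (if r then 1 else 0) = (row.length + (if r then 1 else 0)) + 1
        by omega,
      List.range_succ_eq_map, List.map_cons, List.map_map]
    have h0 : g 0 = "." := by
      rw [hg 0, if_neg (by norm_num)]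
    have htail : (List.range (row.length + (if r then 1 else 0))).map (g ∘ Nat.succ)
        = row ++ (if r then ["."] else []) := by
      apply row_tail_eq
      intro c
      simp only [Function.comp_apply, hg (Nat.succ c)]
      norm_num
    rw [h0, htail]
    rfl

-- a body row of B equals the padded row of the canonical form
theorem alt_row_eq (lst : List (List String)) (top left right : Bool) (i : Nat)
    (hi : i < lst.length) :
    (List.range (addRimsAltWidth lst top left right (i + (if top then 1 else 0)))).map
      (fun c => addRimsAltCell lst top left (i + (if top then 1 else 0)) c)
      = (if left then ["."] else []) ++ lst[i] ++ (if right then ["."] else []) := by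
  have hrr : ((i + (if top then 1 else 0) : Nat) : Int) - (if top then 1 else 0) = (i : Int) := by
    cases top <;> push_cast <;> omega
  have hget : PySem.List.pyGet? lst ((i : Nat) : Int) = some lst[i] := by
    have := PySem.List.pyGet?_eq_some_getElem lst (i := ((i : Nat) : Int))
      (Int.natCast_nonneg i) (by exact_mod_cast hi)
    simpa using this
  have hw : addRimsAltWidth lst top left right (i + (if top then 1 else 0))
      = (if left then 1 else 0) + lst[i].length + (if right then 1 else 0) := by
    simp only [addRimsAltWidth, hrr, hget, Option.getD_some]
    rw [if_pos ⟨Int.natCast_nonneg i, by exact_mod_cast hi⟩]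
    omega
  rw [hw]
  apply range_map_pad
  intro c
  simp only [addRimsAltCell, hrr, hget, Option.getD_some]
  by_cases h : 0 ≤ (c : Int) - (if left then 1 else 0) ∧
      (c : Int) - (if left then 1 else 0) < lst[i].length
  · rw [if_pos ⟨Int.natCast_nonneg i, by exact_mod_cast hi, h.1, h.2⟩, if_pos h]
  · rw [if_neg (by intro hx; exact h ⟨hx.2.2.1, hx.2.2.2⟩), if_neg h]

-- a rim row of B is a replicate of '.'
theorem alt_rim_eq (lst : List (List String)) (top left right : Bool) (r : Nat)
    (hr : ((r : Int) - (if top then 1 else 0) < 0) ∨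
          ((lst.length : Int) ≤ (r : Int) - (if top then 1 else 0))) :
    (List.range (addRimsAltWidth lst top left right r)).map (fun c => addRimsAltCell lst top left r c)
      = List.replicate (((PySem.List.pyGet? lst 0).getD []).length
          + (if left then 1 else 0) + (if right then 1 else 0)) "." := by
  have hcond : ¬ (0 ≤ (r : Int) - (if top then 1 else 0) ∧
      (r : Int) - (if top then 1 else 0) < lst.length) := by omega
  have hw : addRimsAltWidth lst top left right r
      = ((PySem.List.pyGet? lst 0).getD []).length
          + (if left then 1 else 0) + (if right then 1 else 0) := by
    simp only [addRimsAltWidth]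
    rw [if_neg hcond]
  have hcell : ∀ c, addRimsAltCell lst top left r c = "." := by
    intro c
    simp only [addRimsAltCell]
    rw [if_neg (by intro h; exact hcond ⟨h.1, h.2.1⟩)]
  rw [hw]
  apply List.ext_getElem <;> simp [hcell]

-- assembling B's output row by row gives the canonical three-part concatenation
theorem alt_assemble (lst : List (List String)) (top bottom left right : Bool) :
    (List.range (lst.length + (if top then 1 else 0) + (if bottom then 1 else 0))).map
      (fun r => (List.range (addRimsAltWidth lst top left right r)).map
        (fun c => addRimsAltCell lst top left r c))
    = (if top then [List.replicate (((PySem.List.pyGet? lst 0).getD []).length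
          + (if left then 1 else 0) + (if right then 1 else 0)) "."] else [])
      ++ lst.map (fun row => (if left then ["."] else []) ++ row ++ (if right then ["."] else []))
      ++ (if bottom then [List.replicate (((PySem.List.pyGet? lst 0).getD []).length
          + (if left then 1 else 0) + (if right then 1 else 0)) "."] else []) := by
  rw [show lst.length + (if top then 1 else 0) + (if bottom then 1 else 0)
      = (if top then 1 else 0) + (lst.length + (if bottom then 1 else 0)) by omega,
    List.range_add, List.range_add]
  simp only [List.map_append, List.map_map]
  rw [List.append_assoc]
  congr 1
  · -- top rim
    cases top
    · simp
    · simp [alt_rim_eq lst true left right 0 (Or.inl (by norm_num))]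
  congr 1
  · -- body rows
    apply List.ext_getElem
    · simp
    · intro i hi1 hi2
      have hi' : i < lst.length := by simpa using hi2
      simp only [List.getElem_map, List.getElem_range, Function.comp_apply]
      rw [show (if top then 1 else 0) + i = i + (if top then 1 else 0) by omega]
      exact alt_row_eq lst top left right i hi'
  · -- bottom rim
    cases bottom
    · simp
    · simp only [if_true, List.range_one, List.map_cons, List.map_nil, Function.comp_apply]
      rw [alt_rim_eq lst top left right ((if top then 1 else 0) + (lst.length + 0))
          (Or.inr (by cases top <;> push_cast <;> omega))]

-- B equals the canonical form under Pre_
theorem alt_eq_canon (lst : List (List String)) (hrows : ∀ row ∈ lst, row ≠ []) :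
    add_rims_alt lst = addRimsCanon lst := by
  simp only [add_rims_alt, addRimsCanon,
    alt_flag_eq lst 0 hrows (Or.inl rfl), alt_flag_eq lst (-1) hrows (Or.inr rfl)]
  exact alt_assemble lst _ _ _ _

-- ===== VERDICT (by name: the statement is the Claim_ definition above) =====
theorem add_rims_spec : Claim_equal_add_rims := by
  intro lst _ hpre
  unfold Spec_add_rims
  rw [add_rims_eq_canon, alt_eq_canon lst hpre.2]
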